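-- pv_equiv track=rewrite | github.com/DayLight-Creative-Technologies/riverpod_3_scanner | riverpod_3_scanner/utils.py | _skip_triple_string
-- ===== SOURCE A (Python) =====
-- def _skip_triple_string(
--     content: str, start: int, length: int, triple: str
-- ) -> int:
--     """Skip past a triple-quoted string.
--
--     Triple-quoted strings can span multiple lines and support escape sequences
--     (including escaped quotes). We scan for the closing triple-quote while
--     skipping any backslash-escaped characters.
--
--     Args:
--         content: Source content.
--         start: Position of the first quote of the opening triple.
--         length: Length of content.
--         triple: The triple-quote delimiter (either ''' or \"\"\").
--
--     Returns:
--         Position after the closing triple-quote.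
--     """
--     i = start + 3  # Skip opening triple
--     while i < length:
--         if content[i] == '\\':
--             i += 2  # Skip escaped character
--             continue
--         if content[i:i + 3] == triple:
--             return i + 3
--         i += 1
--     return length
-- ===== SOURCE B (Python) =====
-- def _skip_triple_string(content, start, length, triple):
--     i = start + 3  # Skip opening triple
--     while i < length:
--         nb = content.find('\\', i)
--         nt = content.find(triple, i)
--         b_ok = nb != -1 and nb < length
--         t_ok = nt != -1 and nt < length
--         if t_ok and (not b_ok or nt < nb):
--             return nt + 3
--         if not b_ok:
--             return length
--         i = nb + 2
--     return length
-- ===== Notes on version B (the rewrite author's own statement) =====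
-- stated objective: faster
-- what changed: B replaces A's one-character-at-a-time while-loop scan by jumps between str.find results for the next backslash and the next closing triple, deciding each step from the two indices.
-- outside the precondition, e.g. on _skip_triple_string('"""a', -6, 2, '"""'): A returns 3, B returns 2; on _skip_triple_string('aaaxa', 0, 5, 'x'): A returns 5, B returns 6; on _skip_triple_string('abc', 0, 5, '"""'): A raises IndexError, B returns 5
import Mathlib
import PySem

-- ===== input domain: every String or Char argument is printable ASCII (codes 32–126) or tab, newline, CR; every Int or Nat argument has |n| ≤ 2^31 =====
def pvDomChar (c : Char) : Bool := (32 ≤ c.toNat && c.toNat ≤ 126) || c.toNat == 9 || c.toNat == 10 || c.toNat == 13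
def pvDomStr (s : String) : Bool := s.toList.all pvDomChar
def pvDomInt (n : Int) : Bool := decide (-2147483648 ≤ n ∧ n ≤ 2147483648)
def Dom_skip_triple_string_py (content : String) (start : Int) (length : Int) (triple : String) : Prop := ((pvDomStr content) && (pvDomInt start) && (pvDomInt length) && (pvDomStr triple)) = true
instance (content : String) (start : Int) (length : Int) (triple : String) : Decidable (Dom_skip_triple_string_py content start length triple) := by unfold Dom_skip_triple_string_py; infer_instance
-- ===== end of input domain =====

-- B replaces A's one-character-at-a-time scan by jumps between str.find results for the
-- next backslash and the next closing triple (objective: faster — stretches are scanned by C-level str.find).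

-- ===== PORT A =====
-- A's while loop: i advances by 1, or by 2 over an escape; returns i+3 on a triple match.
def skipAgo (cs : List Char) (length : Int) (triple : List Char) (i : Int) : Int :=
  if _hi : i < length then
    match PySem.List.pyGet? cs i with
    | none => 0  -- Python raises IndexError here (outside Pre_)
    | some c =>
      if c = '\\' then skipAgo cs length triple (i + 2)
      else if PySem.List.slice cs (some i) (some (i + 3)) = triple then i + 3
      else skipAgo cs length triple (i + 1)
  else length
termination_by (length - i).toNat
decreasing_by all_goals omega

def skip_triple_string_py (content : String) (start : Int) (length : Int) (triple : String) : Int :=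
  skipAgo content.toList length triple.toList (start + 3)

-- ===== PORT B =====
-- needed by the port's decreasing_by: a found index is ≥ the search start
theorem pv_findFrom_ge (cs sub : List Char) (i : Int)
    (h : PySem.Chars.findFrom cs sub i none ≠ -1) :
    i ≤ PySem.Chars.findFrom cs sub i none := by
  unfold PySem.Chars.findFrom at h ⊢
  simp only [] at h ⊢
  split_ifs at h ⊢ <;>
    first
      | omega
      | (rename_i hne
         have h0 := (PySem.Chars.find_nonneg_iff _ _).2 ((PySem.Chars.find_ne_neg_one_iff _ _).1 hne)
         omega)

def skipBgo (cs : List Char) (length : Int) (triple : List Char) (i : Int) : Int :=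
  if _hi : i < length then
    let nb := PySem.Chars.findFrom cs ['\\'] i none
    let nt := PySem.Chars.findFrom cs triple i none
    if (nt ≠ -1 ∧ nt < length) ∧ (¬(nb ≠ -1 ∧ nb < length) ∨ nt < nb) then nt + 3
    else if _hb : nb ≠ -1 ∧ nb < length then skipBgo cs length triple (nb + 2)
    else length
  else length
termination_by (length - i).toNat
decreasing_by
  have := pv_findFrom_ge cs ['\\'] i _hb.1
  omega

def skip_triple_string_py_alt (content : String) (start : Int) (length : Int) (triple : String) : Int :=
  skipBgo content.toList length triple.toList (start + 3)

-- ===== PRECONDITION & SPEC =====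
-- Pre_ admits every input whose scan loop never runs (length ≤ start + 3: A trivially returns
-- length), and otherwise every input with a nonnegative start, length at most the real
-- len(content), and a triple that is either the documented 3-character delimiter or absent from
-- content altogether (then neither side can ever match it): outside it A either raises IndexError
-- (length > len(content)), reads characters through Python's negative-index wraparound
-- (start + 3 < 0), or compares a 3-character slice against an occurring delimiter of another
-- length, none of which the function's contract covers.
def Pre_skip_triple_string_py (content : String) (start : Int) (length : Int) (triple : String) : Prop :=
  length ≤ start + 3 ∨
    (0 ≤ start ∧ length ≤ (content.toList.length : Int) ∧
      (triple.toList.length = 3 ∨ PySem.Chars.isIn triple.toList content.toList = false))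
instance (content : String) (start : Int) (length : Int) (triple : String) : Decidable (Pre_skip_triple_string_py content start length triple) := by unfold Pre_skip_triple_string_py; infer_instance

def pvWitness_skip_triple_string_py : String × Int × Int × String := ("\"\"\"a\\\"b\"\"\"c", 0, 11, "\"\"\"")

def Spec_skip_triple_string_py (content : String) (start : Int) (length : Int) (triple : String) (out : Int) : Prop := out = skip_triple_string_py_alt content start length triple
instance (content : String) (start : Int) (length : Int) (triple : String) (out : Int) : Decidable (Spec_skip_triple_string_py content start length triple out) := by unfold Spec_skip_triple_string_py; infer_instance

-- ===== CLAIM (what is proved, stated in full; the proofs are below) =====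
def Claim_equal_skip_triple_string_py : Prop := ∀ (content : String) (start : Int) (length : Int) (triple : String), Dom_skip_triple_string_py content start length triple → Pre_skip_triple_string_py content start length triple → Spec_skip_triple_string_py content start length triple (skip_triple_string_py content start length triple)

-- ===== LEMMAS AND PROOFS =====

-- a singleton prefix of a drop is an indexed character
theorem pv_single_prefix_iff (cs : List Char) (c : Char) (j : Nat) :
    [c] <+: cs.drop j ↔ cs[j]? = some c := by
  have hg : cs[j]? = (cs.drop j)[0]? := by simp [List.getElem?_drop]
  cases hd : cs.drop j with
  | nil => simp [hg, hd]
  | cons a t => simp [hg, hd, List.cons_prefix_cons, eq_comm]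

-- Python's xs[i] for a nonnegative in-or-out-of-range index
theorem pv_pyGet?_eq (cs : List Char) (i : Int) (h0 : 0 ≤ i) :
    PySem.List.pyGet? cs i = cs[i.toNat]? := by
  rcases Int.eq_ofNat_of_zero_le h0 with ⟨n, rfl⟩
  simp [PySem.List.pyGet?_natCast]

-- A's 3-character slice test is a prefix test when the delimiter has length 3
theorem pv_slice_eq_iff (cs tr : List Char) (i : Int) (h0 : 0 ≤ i) (htr : tr.length = 3) :
    PySem.List.slice cs (some i) (some (i + 3)) = tr ↔ tr <+: cs.drop i.toNat := by
  have hi : i = ((i.toNat : Nat) : Int) := (Int.toNat_of_nonneg h0).symm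
  rw [hi, show ((i.toNat : Int) + 3) = ((i.toNat : Int) + ((3 : Nat) : Int)) by norm_num,
    PySem.List.slice_natCast_add]
  simp only [Int.toNat_natCast]
  constructor
  · intro h
    exact h ▸ List.take_prefix 3 (cs.drop i.toNat)
  · intro h
    rw [List.prefix_iff_eq_take, htr] at h
    exact h.symm

-- A's scan passes unchanged over a stretch with no backslash and no delimiter occurrence
theorem pv_skipA_clean (cs tr : List Char) (length : Int)
    (hlen : length ≤ (cs.length : Int)) (htr : tr.length = 3) :
    ∀ (n : Nat) (i m : Int), (m - i).toNat ≤ n → 0 ≤ i → i ≤ m → m ≤ length →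
    (∀ j : Nat, i ≤ (j : Int) → (j : Int) < m → cs[j]? ≠ some '\\' ∧ ¬ tr <+: cs.drop j) →
    skipAgo cs length tr i = skipAgo cs length tr m := by
  intro n
  induction n with
  | zero =>
    intro i m hfuel h0 him hm _
    have : i = m := by omega
    rw [this]
  | succ n IH =>
    intro i m hfuel h0 him hm hclean
    rcases eq_or_lt_of_le him with heq | hlt
    · rw [heq]
    · have hil : i < length := lt_of_lt_of_le hlt hm
      have hilen : i.toNat < cs.length := by omega
      have hget : PySem.List.pyGet? cs i = cs[i.toNat]? := pv_pyGet?_eq cs i h0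
      have hsome : cs[i.toNat]? = some cs[i.toNat] := List.getElem?_eq_getElem hilen
      have hcl := hclean i.toNat (by omega) (by omega)
      rw [skipAgo]
      simp only [hil, dif_pos, hget, hsome]
      have hnb : ¬ cs[i.toNat] = '\\' := by
        intro h; exact hcl.1 (by rw [hsome, h])
      have hnt : ¬ PySem.List.slice cs (some i) (some (i + 3)) = tr := by
        rw [pv_slice_eq_iff cs tr i h0 htr]; exact hcl.2
      simp only [hnb, if_false, hnt]
      exact IH (i + 1) m (by omega) (by omega) (by omega) hm
        (fun j hj1 hj2 => hclean j (by omega) hj2)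

-- the two loops agree from any nonnegative position
theorem pv_loop_eq (cs tr : List Char) (length : Int)
    (hlen : length ≤ (cs.length : Int)) (htr : tr.length = 3) :
    ∀ (n : Nat) (i : Int), (length - i).toNat ≤ n → 0 ≤ i →
    skipAgo cs length tr i = skipBgo cs length tr i := by
  intro n
  induction n with
  | zero =>
    intro i hfuel h0
    have hi : ¬ i < length := by omega
    rw [skipAgo, skipBgo]
    simp [hi]
  | succ n IH =>
    intro i hfuel h0
    by_cases hi : i < length
    · have hk : i = ((i.toNat : Nat) : Int) := (Int.toNat_of_nonneg h0).symm
      have hkle : i.toNat ≤ cs.length := by omega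
      set nb := PySem.Chars.findFrom cs ['\\'] i none with hnb
      set nt := PySem.Chars.findFrom cs tr i none with hnt
      -- characterisations of the two find results
      have hnbspec : nb ≠ -1 →
          i ≤ nb ∧ cs[nb.toNat]? = some '\\' ∧
          ∀ j : Nat, i.toNat ≤ j → j < nb.toNat → cs[j]? ≠ some '\\' := by
        intro h
        rw [hnb, hk] at h ⊢
        obtain ⟨h1, h2, h3⟩ := PySem.Chars.findFrom_natCast_spec cs ['\\'] i.toNat hkle h
        rw [pv_single_prefix_iff] at h2
        exact ⟨h1, h2, fun j hj1 hj2 hc => h3 j hj1 hj2 ((pv_single_prefix_iff cs '\\' j).2 hc)⟩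
      have hnbnone : nb = -1 → ∀ j : Nat, i.toNat ≤ j → cs[j]? ≠ some '\\' := by
        intro h j hj hc
        rw [hnb, hk, PySem.Chars.findFrom_natCast_eq_neg_one_iff cs ['\\'] i.toNat hkle] at h
        apply h
        rw [← PySem.Chars.isIn_iff_infix, ← PySem.Chars.exists_prefix_drop_iff_isIn]
        refine ⟨j - i.toNat, ?_⟩
        rw [List.drop_drop, pv_single_prefix_iff]
        rwa [show i.toNat + (j - i.toNat) = j by omega]
      have hntspec : nt ≠ -1 →
          i ≤ nt ∧ tr <+: cs.drop nt.toNat ∧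
          ∀ j : Nat, i.toNat ≤ j → j < nt.toNat → ¬ tr <+: cs.drop j := by
        intro h
        rw [hnt, hk] at h ⊢
        exact PySem.Chars.findFrom_natCast_spec cs tr i.toNat hkle h
      have hntnone : nt = -1 → ∀ j : Nat, i.toNat ≤ j → ¬ tr <+: cs.drop j := by
        intro h j hj hc
        rw [hnt, hk, PySem.Chars.findFrom_natCast_eq_neg_one_iff cs tr i.toNat hkle] at h
        apply h
        rw [← PySem.Chars.isIn_iff_infix, ← PySem.Chars.exists_prefix_drop_iff_isIn]
        refine ⟨j - i.toNat, ?_⟩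
        rw [List.drop_drop]
        rwa [show i.toNat + (j - i.toNat) = j by omega]
      -- no backslash strictly before nb (in either sense), no delimiter strictly before nt
      have hnoBS : ∀ j : Nat, i.toNat ≤ j → ((j : Int) < nb ∨ nb = -1 ∨ ¬ nb < length) →
          (j : Int) < length → cs[j]? ≠ some '\\' := by
        intro j hj hcase hjlen hc
        by_cases hne : nb = -1
        · exact hnbnone hne j hj hc
        · obtain ⟨hge, _, hmin⟩ := hnbspec hne
          rcases hcase with hlt | h1 | h2
          · exact hmin j hj (by omega) hc
          · exact hne h1
          · -- nb ≥ length > j, so j < nb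
            have : (j : Int) < nb := by omega
            exact hmin j hj (by omega) hc
      have hnoTR : ∀ j : Nat, i.toNat ≤ j → ((j : Int) < nt ∨ nt = -1 ∨ ¬ nt < length) →
          (j : Int) < length → ¬ tr <+: cs.drop j := by
        intro j hj hcase hjlen hc
        by_cases hne : nt = -1
        · exact hntnone hne j hj hc
        · obtain ⟨hge, _, hmin⟩ := hntspec hne
          rcases hcase with hlt | h1 | h2
          · exact hmin j hj (by omega) hc
          · exact hne h1
          · exact hmin j hj (by omega) hc
      rw [skipBgo]
      simp only [hi, dif_pos, ← hnb, ← hnt]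
      by_cases hC : (nt ≠ -1 ∧ nt < length) ∧ (¬(nb ≠ -1 ∧ nb < length) ∨ nt < nb)
      · -- B returns nt + 3; A scans cleanly to nt and matches there
        rw [if_pos hC]
        obtain ⟨⟨htne, htlt⟩, hside⟩ := hC
        obtain ⟨htge, htpre, _⟩ := hntspec htne
        have hntnn : 0 ≤ nt := le_trans h0 htge
        have hclean : ∀ j : Nat, i ≤ (j : Int) → (j : Int) < nt →
            cs[j]? ≠ some '\\' ∧ ¬ tr <+: cs.drop j := by
          intro j hj1 hj2
          refine ⟨?_, hnoTR j (by omega) (Or.inl hj2) (by omega)⟩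
          intro hc
          have hbne : nb ≠ -1 ∧ nb < length := by
            by_cases hne : nb = -1
            · exact absurd hc (hnbnone hne j (by omega))
            · obtain ⟨_, _, hmin⟩ := hnbspec hne
              constructor
              · exact hne
              · by_contra hge
                exact hnoBS j (by omega) (Or.inr (Or.inr hge)) (by omega) hc
          rcases hside with h1 | h2
          · exact h1 hbne
          · -- nt < nb yet backslash at j < nt: contradicts nb minimality
            obtain ⟨_, _, hmin⟩ := hnbspec hbne.1
            exact hmin j (by omega) (by omega) hc
        rw [pv_skipA_clean cs tr length hlen htr (nt - i).toNat i nt (by omega) h0 htge (by omega) hclean]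
        rw [skipAgo]
        have hntlen : nt.toNat < cs.length := by omega
        have hget : PySem.List.pyGet? cs nt = cs[nt.toNat]? := pv_pyGet?_eq cs nt hntnn
        have hsome : cs[nt.toNat]? = some cs[nt.toNat] := List.getElem?_eq_getElem hntlen
        simp only [htlt, dif_pos, hget, hsome]
        have hnbs : ¬ cs[nt.toNat] = '\\' := by
          intro hc
          have hc' : cs[nt.toNat]? = some '\\' := by rw [hsome, hc]
          have hbne : nb ≠ -1 ∧ nb < length := by
            by_cases hne : nb = -1
            · exact absurd hc' (hnbnone hne nt.toNat (by omega))
            · obtain ⟨_, _, hmin⟩ := hnbspec hne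
              exact ⟨hne, by
                by_contra hge
                exact hnoBS nt.toNat (by omega) (Or.inr (Or.inr hge)) (by omega) hc'⟩
          rcases hside with h1 | h2
          · exact h1 hbne
          · obtain ⟨_, _, hmin⟩ := hnbspec hbne.1
            exact hmin nt.toNat (by omega) (by omega) hc'
        have hslice : PySem.List.slice cs (some nt) (some (nt + 3)) = tr :=
          (pv_slice_eq_iff cs tr nt hntnn htr).2 htpre
        simp [hnbs, hslice]
      · rw [if_neg hC]
        by_cases hB : nb ≠ -1 ∧ nb < length
        · -- B jumps to nb + 2; A scans cleanly to nb, sees the backslash, recurses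
          rw [dif_pos hB]
          obtain ⟨hbne, hblt⟩ := hB
          obtain ⟨hbge, hbchar, hbmin⟩ := hnbspec hbne
          have hbnn : 0 ≤ nb := le_trans h0 hbge
          have hclean : ∀ j : Nat, i ≤ (j : Int) → (j : Int) < nb →
              cs[j]? ≠ some '\\' ∧ ¬ tr <+: cs.drop j := by
            intro j hj1 hj2
            refine ⟨hbmin j (by omega) (by omega), ?_⟩
            intro hc
            -- a delimiter at j < nb < length would make B's first branch fire
            have htne : nt ≠ -1 := by
              intro hne; exact hntnone hne j (by omega) hc
            obtain ⟨_, _, htmin⟩ := hntspec htne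
            have hjnt : nt.toNat ≤ j := by
              by_contra hlt
              exact htmin j (by omega) (by omega) hc
            have hntnn : 0 ≤ nt := by
              rw [hnt, hk] at htne ⊢
              exact le_trans (by omega) (PySem.Chars.findFrom_natCast_spec cs tr i.toNat hkle htne).1
            exact hC ⟨⟨htne, by omega⟩, Or.inr (by omega)⟩
          rw [pv_skipA_clean cs tr length hlen htr (nb - i).toNat i nb (by omega) h0 hbge (by omega) hclean]
          rw [skipAgo]
          have hget : PySem.List.pyGet? cs nb = cs[nb.toNat]? := pv_pyGet?_eq cs nb hbnn
          simp only [hblt, dif_pos, hget, hbchar]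
          rw [if_pos trivial]
          exact IH (nb + 2) (by omega) (by omega)
        · -- B returns length; A scans cleanly off the end
          rw [dif_neg hB]
          have hclean : ∀ j : Nat, i ≤ (j : Int) → (j : Int) < length →
              cs[j]? ≠ some '\\' ∧ ¬ tr <+: cs.drop j := by
            intro j hj1 hj2
            constructor
            · apply hnoBS j (by omega) _ hj2
              by_cases hne : nb = -1
              · exact Or.inr (Or.inl hne)
              · exact Or.inr (Or.inr (fun hlt => hB ⟨hne, hlt⟩))
            · intro hc
              have htne : nt ≠ -1 := by
                intro hne; exact hntnone hne j (by omega) hc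
              obtain ⟨htge, _, htmin⟩ := hntspec htne
              have hjnt : nt.toNat ≤ j := by
                by_contra hlt
                exact htmin j (by omega) (by omega) hc
              have hntnn : 0 ≤ nt := le_trans h0 htge
              exact hC ⟨⟨htne, by omega⟩, Or.inl (fun h => hB h)⟩
          rw [pv_skipA_clean cs tr length hlen htr (length - i).toNat i length (by omega) h0 (by omega) (by omega) hclean]
          rw [skipAgo]
          simp
    · rw [skipAgo, skipBgo]
      simp [hi]

-- when the delimiter never occurs in the content, both loops run off the end and return length
theorem pv_noocc_eq (cs tr : List Char) (length : Int)
    (hlen : length ≤ (cs.length : Int)) (hni : PySem.Chars.isIn tr cs = false) :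
    ∀ (n : Nat) (i : Int), (length - i).toNat ≤ n → 0 ≤ i →
    skipAgo cs length tr i = length ∧ skipBgo cs length tr i = length := by
  have hnoPre : ∀ j : Nat, ¬ tr <+: cs.drop j := by
    intro j hc
    rw [PySem.Chars.isIn_eq_false_iff, ← PySem.Chars.isIn_iff_infix,
      ← PySem.Chars.exists_prefix_drop_iff_isIn] at hni
    exact hni ⟨j, hc⟩
  intro n
  induction n with
  | zero =>
    intro i hfuel h0
    have hi : ¬ i < length := by omega
    rw [skipAgo, skipBgo]
    simp [hi]
  | succ n IH =>
    intro i hfuel h0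
    by_cases hi : i < length
    · constructor
      · rw [skipAgo]
        have hget : PySem.List.pyGet? cs i = cs[i.toNat]? := pv_pyGet?_eq cs i h0
        have hilen : i.toNat < cs.length := by omega
        have hsome : cs[i.toNat]? = some cs[i.toNat] := List.getElem?_eq_getElem hilen
        simp only [hi, dif_pos, hget, hsome]
        have hns : ¬ PySem.List.slice cs (some i) (some (i + 3)) = tr := by
          intro hc
          apply hnoPre i.toNat
          rw [show i = ((i.toNat : Nat) : Int) from (Int.toNat_of_nonneg h0).symm,
            show ((i.toNat : Int) + 3) = ((i.toNat : Int) + ((3 : Nat) : Int)) by norm_num,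
            PySem.List.slice_natCast_add] at hc
          try simp only [Int.toNat_natCast] at hc
          exact hc ▸ List.take_prefix 3 (cs.drop i.toNat)
        by_cases hbs : cs[i.toNat] = '\\'
        · simp only [hbs, if_true]
          exact (IH (i + 2) (by omega) (by omega)).1
        · simp only [hbs, if_false, hns]
          exact (IH (i + 1) (by omega) (by omega)).1
      · rw [skipBgo]
        simp only [hi, dif_pos]
        set nt := PySem.Chars.findFrom cs tr i none with hnt
        set nb := PySem.Chars.findFrom cs ['\\'] i none with hnb
        have hntne : ¬ (nt ≠ -1 ∧ nt < length) := by
          rintro ⟨hne, -⟩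
          rw [hnt, show i = ((i.toNat : Nat) : Int) from (Int.toNat_of_nonneg h0).symm] at hne
          exact hnoPre _ (PySem.Chars.findFrom_natCast_spec cs tr i.toNat (by omega) hne).2.1
        rw [if_neg (fun hc => hntne hc.1)]
        by_cases hb : nb ≠ -1 ∧ nb < length
        · rw [dif_pos hb]
          have hbge := pv_findFrom_ge cs ['\\'] i hb.1
          exact (IH (nb + 2) (by omega) (by omega)).2
        · rw [dif_neg hb]
    · have : ¬ i < length := hi
      rw [skipAgo, skipBgo]
      simp [this]

-- ===== VERDICT (by name: the statement is the Claim_ definition above) =====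
theorem skip_triple_string_py_spec : Claim_equal_skip_triple_string_py := by
  intro content start length triple _ hpre
  unfold Spec_skip_triple_string_py skip_triple_string_py skip_triple_string_py_alt
  rcases hpre with htriv | ⟨hs, hl, ht | hni⟩
  · have hnl : ¬ start + 3 < length := by omega
    rw [skipAgo, skipBgo]
    simp [hnl]
  · exact pv_loop_eq content.toList triple.toList length hl ht
      (length - (start + 3)).toNat (start + 3) (by omega) (by omega)
  · have h := pv_noocc_eq content.toList triple.toList length hl hni
      (length - (start + 3)).toNat (start + 3) (by omega) (by omega)
    rw [h.1, h.2]
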